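-- pv_equiv track=rewrite | github.com/Harshith-19/Student-Registration-Portal | Cardgame/cardgame.py | cardchoice3
-- ===== SOURCE A (Python) =====
-- def cardchoice3(a,b,c,bot):
--     flag=0
--     for i in bot:
--         if(a[1]==i[1] and i[0]>a[0] and i[0]>b[0] and i[0]>c[0]):
--
--            b=i
--            flag=1
--            break
--
--         elif(a[1]==i[1]):
--             for i in range(len(bot)-1,-1,-1):
--                 if(a[1]==bot[i][1]):
--                    b=bot[i]
--                    flag=1
--                    break
--             if(flag==1):
--                 break
--     if(flag!=1):
--         b=bot[-1]
--     return b
-- ===== SOURCE B (Python) =====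
-- def cardchoice3(a, b, c, bot):
--     matches = [x for x in bot if x[1] == a[1]]
--     if not matches:
--         return bot[-1]
--     first = matches[0]
--     if first[0] > a[0] and first[0] > b[0] and first[0] > c[0]:
--         return first
--     return matches[-1]
-- ===== Notes on version B (the rewrite author's own statement) =====
-- stated objective: simpler
-- what changed: Replaces A's flag/early-break outer scan with a nested backward index loop by a single filter of the suit-matching cards followed by two constant-time picks (first element if it beats all three table cards, else last element), falling back to bot[-1] when no card matches.
import Mathlib
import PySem

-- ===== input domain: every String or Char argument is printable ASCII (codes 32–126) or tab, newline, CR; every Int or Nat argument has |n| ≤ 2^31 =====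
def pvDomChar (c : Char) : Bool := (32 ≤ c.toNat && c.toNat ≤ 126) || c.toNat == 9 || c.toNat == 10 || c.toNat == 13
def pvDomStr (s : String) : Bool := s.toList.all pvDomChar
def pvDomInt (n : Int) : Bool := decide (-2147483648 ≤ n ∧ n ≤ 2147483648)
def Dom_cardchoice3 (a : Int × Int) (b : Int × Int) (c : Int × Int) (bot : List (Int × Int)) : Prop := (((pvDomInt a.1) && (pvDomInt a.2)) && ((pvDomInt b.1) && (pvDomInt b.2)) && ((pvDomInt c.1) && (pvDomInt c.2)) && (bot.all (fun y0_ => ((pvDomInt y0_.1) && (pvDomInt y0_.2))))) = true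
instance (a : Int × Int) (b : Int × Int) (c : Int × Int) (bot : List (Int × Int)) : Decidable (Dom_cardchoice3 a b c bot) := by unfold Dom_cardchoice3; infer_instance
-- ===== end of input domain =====

-- B replaces A's flag/early-break scan with nested backward index loop by one filter of the
-- suit-matching cards plus two constant-time picks (objective: simpler).

-- ===== PORT A =====
-- the inner 'for i in range(len(bot)-1,-1,-1)' backward scan: first j (from the end) with
-- a.2 == bot[j].2; bot[j] via pyGet? (in-range here, so the none arm is unreachable)
def ccBackScan (a2 : Int) (bot : List (Int × Int)) : List Int → Option (Int × Int)
  | [] => none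
  | j :: js =>
    match PySem.List.pyGet? bot j with
    | some x => if a2 == x.2 then some x else ccBackScan a2 bot js
    | none => none

-- the outer 'for i in bot' loop; 'some i' = break with b=i and flag=1, 'none' = loop fell through
def ccLoop (a b c : Int × Int) (bot : List (Int × Int)) : List (Int × Int) → Option (Int × Int)
  | [] => none
  | i :: rs =>
    if a.2 == i.2 && i.1 > a.1 && i.1 > b.1 && i.1 > c.1 then some i
    else if a.2 == i.2 then
      match ccBackScan a.2 bot (PySem.List.pyRange ((bot.length : Int) - 1) (-1) (-1)) with
      | some x => some x
      | none => ccLoop a b c bot rs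
    else ccLoop a b c bot rs

def cardchoice3 (a : Int × Int) (b : Int × Int) (c : Int × Int) (bot : List (Int × Int)) : Int × Int :=
  match ccLoop a b c bot bot with
  | some x => x
  | none => (PySem.List.pyGet? bot (-1)).getD (0, 0)  -- bot[-1]; IndexError (none) excluded by Pre_

-- ===== PORT B =====
def cardchoice3_alt (a : Int × Int) (b : Int × Int) (c : Int × Int) (bot : List (Int × Int)) : Int × Int :=
  let ms := bot.filter (fun x => x.2 == a.2)
  match ms with
  | [] => (PySem.List.pyGet? bot (-1)).getD (0, 0)       -- bot[-1]; excluded by Pre_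
  | first :: _ =>
    if first.1 > a.1 && first.1 > b.1 && first.1 > c.1 then first
    else (PySem.List.pyGet? ms (-1)).getD (0, 0)    -- ms[-1]; nonempty here

-- ===== PRECONDITION & SPEC =====
-- Pre_ excludes only the empty hand, on which both A and B raise IndexError via bot[-1].
def Pre_cardchoice3 (_a : Int × Int) (_b : Int × Int) (_c : Int × Int) (bot : List (Int × Int)) : Prop := bot ≠ []
instance (a : Int × Int) (b : Int × Int) (c : Int × Int) (bot : List (Int × Int)) : Decidable (Pre_cardchoice3 a b c bot) := by unfold Pre_cardchoice3; infer_instance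
def pvWitness_cardchoice3 : (Int × Int) × (Int × Int) × (Int × Int) × (List (Int × Int)) := ((3, 1), (5, 2), (2, 1), [(4, 1), (6, 2), (7, 1)])

def Spec_cardchoice3 (a : Int × Int) (b : Int × Int) (c : Int × Int) (bot : List (Int × Int)) (out : Int × Int) : Prop := out = cardchoice3_alt a b c bot
instance (a : Int × Int) (b : Int × Int) (c : Int × Int) (bot : List (Int × Int)) (out : Int × Int) : Decidable (Spec_cardchoice3 a b c bot out) := by unfold Spec_cardchoice3; infer_instance

-- ===== CLAIM (what is proved, stated in full; the proofs are below) =====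
def Claim_equal_cardchoice3 : Prop := ∀ (a : Int × Int) (b : Int × Int) (c : Int × Int) (bot : List (Int × Int)), Dom_cardchoice3 a b c bot → Pre_cardchoice3 a b c bot → Spec_cardchoice3 a b c bot (cardchoice3 a b c bot)

-- ===== LEMMAS AND PROOFS =====

-- the Int BEq test, in both orientations
theorem cc_beq_comm (x y : Int) : (x == y) = (y == x) := by
  simp [eq_comm]

-- the backward index scan is find? over the reversed prefix
theorem ccBackScan_take (a2 : Int) (bot : List (Int × Int)) :
    ∀ n : Nat, n ≤ bot.length →
      ccBackScan a2 bot (PySem.List.pyRange ((n : Int) - 1) (-1) (-1)) =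
        (bot.take n).reverse.find? (fun x => a2 == x.2) := by
  intro n
  induction n with
  | zero =>
    intro _
    rw [PySem.List.pyRange_neg_one_eq_nil (by norm_num)]
    simp [ccBackScan]
  | succ m ih =>
    intro h
    have hm : m < bot.length := h
    rw [show ((m + 1 : Nat) : Int) - 1 = (m : Int) by push_cast; ring]
    rcases lt_or_ge (m : Int) 0 with h0 | h0
    · omega
    · rw [PySem.List.pyRange_neg_one_cons (by omega)]
      have hget : PySem.List.pyGet? bot (m : Int) = some bot[m] := by
        rw [PySem.List.pyGet?_natCast, List.getElem?_eq_getElem hm]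
      rw [show ((m : Int) - 1) = ((m : Nat) : Int) - 1 from rfl]
      simp only [ccBackScan, hget]
      have htake : (bot.take (m + 1)).reverse = bot[m] :: (bot.take m).reverse := by
        rw [List.take_add_one]
        simp [hm]
      rw [htake]
      by_cases hp : a2 == bot[m].2
      · simp [hp, List.find?]
      · simp only [List.find?, hp]
        simp only [Bool.false_eq_true, if_false]
        exact ih (le_of_lt hm)

theorem ccBackScan_full (a2 : Int) (bot : List (Int × Int)) :
    ccBackScan a2 bot (PySem.List.pyRange ((bot.length : Int) - 1) (-1) (-1)) =
      bot.reverse.find? (fun x => a2 == x.2) := by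
  have := ccBackScan_take a2 bot bot.length le_rfl
  simpa using this

-- find? is the head of the filter
theorem cc_find_eq_head_filter (p : Int × Int → Bool) (l : List (Int × Int)) :
    l.find? p = (l.filter p).head? := by
  induction l with
  | nil => rfl
  | cons x xs ih =>
    by_cases h : p x = true
    · simp [List.find?, h]
    · rw [List.find?_cons_of_neg (by simp [h]), List.filter_cons_of_neg (by simp [h]), ih]

-- find? over the reverse = last match of the filter
theorem cc_find_reverse (p : Int × Int → Bool) (l : List (Int × Int)) :
    l.reverse.find? p = (l.filter p).getLast? := by
  rw [cc_find_eq_head_filter, List.filter_reverse, List.head?_reverse]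

-- characterisation of A's outer loop on any suffix of bot
theorem ccLoop_eq (a b c : Int × Int) (bot : List (Int × Int)) :
    ∀ rest : List (Int × Int), rest.IsSuffix bot →
      ccLoop a b c bot rest =
        match rest.filter (fun x => a.2 == x.2) with
        | [] => none
        | f :: _ =>
          if f.1 > a.1 && f.1 > b.1 && f.1 > c.1 then some f
          else bot.reverse.find? (fun x => a.2 == x.2) := by
  intro rest
  induction rest with
  | nil => intro _; simp [ccLoop]
  | cons i rs ih =>
    intro hsuf
    have hrs : rs.IsSuffix bot := (List.suffix_cons i rs).trans hsuf
    by_cases hp : (a.2 == i.2) = true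
    · have hmem : i ∈ bot := hsuf.subset (List.mem_cons_self)
      by_cases hb : (i.1 > a.1 && i.1 > b.1 && i.1 > c.1) = true
      · simp only [ccLoop, hp]
        simp only [List.filter_cons, hp]
        simp [hb]
      · have hfind : ∃ z, bot.reverse.find? (fun x => a.2 == x.2) = some z := by
          have : (bot.reverse.find? (fun x => a.2 == x.2)).isSome := by
            rw [List.find?_isSome]
            exact ⟨i, List.mem_reverse.mpr hmem, hp⟩
          exact Option.isSome_iff_exists.mp this
        obtain ⟨z, hz⟩ := hfind
        simp only [ccLoop, hp]
        rw [ccBackScan_full, hz]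
        simp only [List.filter_cons, hp]
        simp [hb]
    · simp only [ccLoop]
      rw [if_neg (by simp [hp]), if_neg hp]
      simp only [List.filter_cons, hp]
      simpa using ih hrs

-- ===== VERDICT (by name: the statement is the Claim_ definition above) =====
theorem cardchoice3_spec : Claim_equal_cardchoice3 := by
  intro a b c bot _ hpre
  unfold Spec_cardchoice3 cardchoice3 cardchoice3_alt
  rw [ccLoop_eq a b c bot bot (List.suffix_refl bot)]
  have hfeq : bot.filter (fun x => x.2 == a.2) = bot.filter (fun x => a.2 == x.2) := by
    apply List.filter_congr
    intro x _
    exact cc_beq_comm x.2 a.2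
  rw [hfeq]
  cases hf : bot.filter (fun x => a.2 == x.2) with
  | nil => simp
  | cons f fs =>
    by_cases hb : (f.1 > a.1 && f.1 > b.1 && f.1 > c.1) = true
    · simp [hb]
    · simp only [hb, if_false, Bool.false_eq_true]
      rw [cc_find_reverse, PySem.List.pyGet?_neg_one, hf]
      simp [PySem.List.pyGet?_neg_one, List.getLast?_eq_some_getLast]
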